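-- pv_equiv track=rewrite | github.com/jpcosec/Memoria | lib/utils/viz/load_data.py | convergencia
-- ===== SOURCE A (Python) =====
-- def convergencia(s, neg=True):
--     j = [s[i] - s[i - 1] for i in range(1, len(s))]
--     p = 3
--     for n, i in enumerate(j):
--         if (i > 0) == neg:
--             p -= 1
--         else:
--             p = 3
--
--         if p < 0:
--             return n - 2
-- ===== SOURCE B (Python) =====
-- def convergencia(s, neg=True):
--     signs = [(s[i] - s[i - 1] > 0) == neg for i in range(1, len(s))]
--     for i in range(len(signs) - 3):
--         if all(signs[i:i + 4]):
--             return i + 1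
--     return None
-- ===== Notes on version B (the rewrite author's own statement) =====
-- stated objective: alternative
-- what changed: Replaces A's decrement-and-reset counter over the difference stream with precomputing the boolean sign-match sequence and scanning it for the first all-True window of length 4, returning that window's start index plus 1.
import Mathlib
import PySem

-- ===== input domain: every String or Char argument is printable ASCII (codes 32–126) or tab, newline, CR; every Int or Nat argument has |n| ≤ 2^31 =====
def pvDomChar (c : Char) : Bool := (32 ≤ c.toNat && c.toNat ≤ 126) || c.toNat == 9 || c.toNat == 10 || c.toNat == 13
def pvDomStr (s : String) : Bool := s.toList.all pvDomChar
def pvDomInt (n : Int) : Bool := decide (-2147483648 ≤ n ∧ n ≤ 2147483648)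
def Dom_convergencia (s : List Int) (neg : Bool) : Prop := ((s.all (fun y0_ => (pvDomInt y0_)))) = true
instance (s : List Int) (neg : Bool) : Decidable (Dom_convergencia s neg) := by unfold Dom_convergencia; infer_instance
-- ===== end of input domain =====

-- B replaces A's decrement-and-reset counter with a precomputed sign-match list scanned for the first all-True window of 4 (alternative decomposition, same cost).

-- ===== PORT A =====
-- A's for-loop over enumerate(j) with counter p and early return, as structural recursion over j.
def convLoopA (neg : Bool) (j : List Int) (n p : Int) : Option Int :=
  match j with
  | [] => none
  | i :: rest =>
    let p' := if (decide (i > 0)) == neg then p - 1 else 3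
    if p' < 0 then some (n - 2) else convLoopA neg rest (n + 1) p'

def convergencia (s : List Int) (neg : Bool) : Option Int :=
  -- j = [s[i] - s[i-1] for i in range(1, len(s))]; zipWith over (s, s.tail) yields exactly these differences in order
  let j := List.zipWith (fun a b => b - a) s s.tail
  convLoopA neg j 0 3

-- ===== PORT B =====
-- B's window scan: for i in range(len(signs)-3): if all(signs[i:i+4]): return i+1
def altLoop (sg : List Bool) (i : Int) : Option Int :=
  match sg with
  | a :: b :: c :: d :: rest =>
    if a && b && c && d then some (i + 1) else altLoop (b :: c :: d :: rest) (i + 1)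
  | _ => none

def convergencia_alt (s : List Int) (neg : Bool) : Option Int :=
  -- signs = [(s[i] - s[i-1] > 0) == neg for i in range(1, len(s))]
  let signs := List.zipWith (fun a b => (decide (b - a > 0)) == neg) s s.tail
  altLoop signs 0

-- ===== PRECONDITION & SPEC =====
def Spec_convergencia (s : List Int) (neg : Bool) (out : Option Int) : Prop := out = convergencia_alt s neg
instance (s : List Int) (neg : Bool) (out : Option Int) : Decidable (Spec_convergencia s neg out) := by unfold Spec_convergencia; infer_instance

-- ===== CLAIM (what is proved, stated in full; the proofs are below) =====
def Claim_equal_convergencia : Prop := ∀ (s : List Int) (neg : Bool), Dom_convergencia s neg → Spec_convergencia s neg (convergencia s neg)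

-- ===== LEMMAS AND PROOFS =====

-- A's loop over Int diffs equals the same loop over the precomputed Bool signs.
def aLoop (bs : List Bool) (n p : Int) : Option Int :=
  match bs with
  | [] => none
  | b :: rest =>
    let p' := if b then p - 1 else 3
    if p' < 0 then some (n - 2) else aLoop rest (n + 1) p'

theorem convLoopA_eq_aLoop (neg : Bool) (j : List Int) (n p : Int) :
    convLoopA neg j n p = aLoop (j.map (fun i => (decide (i > 0)) == neg)) n p := by
  induction j generalizing n p with
  | nil => simp [convLoopA, aLoop]
  | cons i rest ih => simp [convLoopA, aLoop, ih]

-- a leading false can be skipped (no window of 4 Trues can contain it)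
theorem skip0 (rest : List Bool) (m : Int) :
    altLoop (false :: rest) m = altLoop rest (m + 1) := by
  rcases rest with _ | ⟨a, _ | ⟨b, _ | ⟨c, t⟩⟩⟩ <;> simp [altLoop]

theorem skip1 (rest : List Bool) (m : Int) :
    altLoop (true :: false :: rest) m = altLoop rest (m + 2) := by
  rcases rest with _ | ⟨a, _ | ⟨b, t⟩⟩
  · simp [altLoop]
  · simp [altLoop]
  · rw [show altLoop (true :: false :: a :: b :: t) m
        = altLoop (false :: a :: b :: t) (m + 1) by simp [altLoop]]
    rw [skip0]; ring_nf

theorem skip2 (rest : List Bool) (m : Int) :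
    altLoop (true :: true :: false :: rest) m = altLoop rest (m + 3) := by
  rcases rest with _ | ⟨a, t⟩
  · simp [altLoop]
  · show altLoop (true :: true :: false :: a :: t) m = altLoop (a :: t) (m + 3)
    rw [show altLoop (true :: true :: false :: a :: t) m
        = altLoop (true :: false :: a :: t) (m + 1) by simp [altLoop]]
    rw [skip1]; ring_nf

theorem skip3 (rest : List Bool) (m : Int) :
    altLoop (true :: true :: true :: false :: rest) m = altLoop rest (m + 4) := by
  rw [show altLoop (true :: true :: true :: false :: rest) m
      = altLoop (true :: true :: false :: rest) (m + 1) by simp [altLoop]]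
  rw [skip2]; ring_nf

theorem skipRep (k : Nat) (hk : k ≤ 3) (rest : List Bool) (m : Int) :
    altLoop (List.replicate k true ++ false :: rest) m = altLoop rest (m + k + 1) := by
  interval_cases k
  · rw [show List.replicate 0 true ++ false :: rest = false :: rest from rfl, skip0]
    congr 1; push_cast; ring
  · rw [show List.replicate 1 true ++ false :: rest = true :: false :: rest from rfl, skip1]
    congr 1; push_cast; ring
  · rw [show List.replicate 2 true ++ false :: rest = true :: true :: false :: rest from rfl, skip2]
    congr 1; push_cast; ring
  · rw [show List.replicate 3 true ++ false :: rest = true :: true :: true :: false :: rest from rfl, skip3]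
    congr 1; push_cast; ring

-- main invariant: after k consecutive matches (counter p = 3 - k), A's loop behaves
-- like B's window scan on the list with k virtual leading Trues, started k positions earlier.
theorem aLoop_eq_altLoop (bs : List Bool) (n : Int) (k : Nat) (hk : k ≤ 3) :
    aLoop bs n (3 - (k : Int)) = altLoop (List.replicate k true ++ bs) (n - (k : Int)) := by
  induction bs generalizing n k with
  | nil =>
    interval_cases k <;> simp [aLoop, altLoop, List.replicate]
  | cons a rest ih =>
    cases a with
    | false =>
      have lhs : aLoop (false :: rest) n (3 - (k : Int)) = aLoop rest (n + 1) 3 := by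
        simp [aLoop]
      rw [lhs]
      have := ih (n + 1) 0 (by omega)
      simp only [Nat.cast_zero, sub_zero, List.replicate, List.nil_append] at this
      rw [this, skipRep k hk rest (n - (k : Int))]
      ring_nf
    | true =>
      by_cases h3 : k = 3
      · subst h3
        have lhs : aLoop (true :: rest) n (3 - ((3 : Nat) : Int)) = some (n - 2) := by
          norm_num [aLoop]
        rw [lhs]
        simp [altLoop, List.replicate]
        ring
      · have hk' : k + 1 ≤ 3 := by omega
        have lhs : aLoop (true :: rest) n (3 - (k : Int))
            = aLoop rest (n + 1) (3 - ((k : Int) + 1)) := by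
          have : ¬ (3 - (k : Int) - 1 < 0) := by omega
          simp [aLoop, this]
          ring_nf
        rw [lhs]
        have := ih (n + 1) (k + 1) hk'
        push_cast at this ⊢
        rw [this]
        have lrep : List.replicate (k + 1) true ++ rest
            = List.replicate k true ++ true :: rest := by
          simp [List.replicate_succ', List.append_assoc]
        rw [lrep]
        ring_nf

-- ===== VERDICT (by name: the statement is the Claim_ definition above) =====
theorem convergencia_spec : Claim_equal_convergencia := by
  intro s neg _
  unfold Spec_convergencia convergencia convergencia_alt
  rw [convLoopA_eq_aLoop]
  have := aLoop_eq_altLoop (List.zipWith (fun a b => b - a) s s.tail |>.map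
    (fun i => (decide (i > 0)) == neg)) 0 0 (by omega)
  simp only [Nat.cast_zero, sub_zero, List.replicate, List.nil_append] at this
  rw [this]
  congr 1
  simp [List.map_zipWith]
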